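-- pv_equiv track=rewrite | github.com/illinoisdata/ElasticNotebook | elastic/core/notebook/find_output_vars.py | find_created_deleted_vars
-- ===== SOURCE A (Python) =====
-- def find_created_deleted_vars(pre_execution, post_execution):
--     created_variables = set()
--     deleted_variables = set()
--
--     # New variables
--     for varname in post_execution.difference(pre_execution):
--         if not varname.startswith('_'):
--             created_variables.add(varname)
--
--     # Deleted variables
--     for varname in pre_execution.difference(post_execution):
--         if not varname.startswith('_'):
--             deleted_variables.add(varname)
--
--     return created_variables, deleted_variables
-- ===== SOURCE B (Python) =====
-- def find_created_deleted_vars(pre_execution, post_execution):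
--     # Tag every name with a presence bitmask (1 = in pre, 2 = in post) in one
--     # dict index, then classify by tag: 2 -> created, 1 -> deleted, 3 -> unchanged.
--     status = {}
--     for varname in pre_execution:
--         status[varname] = 1
--     for varname in post_execution:
--         status[varname] = status.get(varname, 0) | 2
--     created_variables = {v for v, s in status.items() if s == 2 and not v.startswith('_')}
--     deleted_variables = {v for v, s in status.items() if s == 1 and not v.startswith('_')}
--     return created_variables, deleted_variables
-- ===== Notes on version B (the rewrite author's own statement) =====
-- stated objective: alternative
-- what changed: B builds one dict tagging each name with a presence bitmask (1=pre, 2=post) and classifies names by tag, instead of A's two set-difference-and-filter loops.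
import Mathlib
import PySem

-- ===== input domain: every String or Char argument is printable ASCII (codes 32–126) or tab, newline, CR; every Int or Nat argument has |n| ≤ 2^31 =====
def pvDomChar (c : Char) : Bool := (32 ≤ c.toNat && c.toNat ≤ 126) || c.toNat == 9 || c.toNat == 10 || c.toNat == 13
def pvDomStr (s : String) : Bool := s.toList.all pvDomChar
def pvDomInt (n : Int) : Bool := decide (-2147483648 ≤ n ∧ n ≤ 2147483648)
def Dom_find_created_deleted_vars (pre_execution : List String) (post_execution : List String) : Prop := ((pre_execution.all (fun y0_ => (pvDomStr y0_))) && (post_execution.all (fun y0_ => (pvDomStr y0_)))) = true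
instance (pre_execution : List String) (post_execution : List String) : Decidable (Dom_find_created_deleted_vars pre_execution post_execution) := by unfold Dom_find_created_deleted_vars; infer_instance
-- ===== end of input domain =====

-- B replaces A's two set-difference-and-filter loops by one dict indexing each
-- name with a presence bitmask (1 = pre, 2 = post), then classifies by tag (alternative decomposition).

-- ===== PORT A =====
-- two loops, each over one set difference, adding non-underscore names to a fresh set
def find_created_deleted_vars (pre_execution : List String) (post_execution : List String) : List String × List String :=
  let created_variables :=
    (PySem.Set.diff post_execution pre_execution).foldl
      (fun s varname => if PySem.Str.startswith varname "_" then s else PySem.Set.add s varname)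
      PySem.Set.empty
  let deleted_variables :=
    (PySem.Set.diff pre_execution post_execution).foldl
      (fun s varname => if PySem.Str.startswith varname "_" then s else PySem.Set.add s varname)
      PySem.Set.empty
  (created_variables, deleted_variables)

-- ===== PORT B =====
-- one dict 'status' tagging every name with a presence bitmask, built by two insert
-- loops; then two set comprehensions over status.items() select tags 2 and 1
def find_created_deleted_vars_alt (pre_execution : List String) (post_execution : List String) : List String × List String :=
  let status0 := pre_execution.foldl (fun d varname => d.insert varname (1 : Int)) PySem.Dict.empty
  let status := post_execution.foldl (fun d varname => d.insert varname (PySem.Int.bor (d.getD varname 0) 2)) status0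
  let created_variables := PySem.Set.ofList
    ((status.items.filter (fun p => p.2 == 2 && !(PySem.Str.startswith p.1 "_"))).map (fun p => p.1))
  let deleted_variables := PySem.Set.ofList
    ((status.items.filter (fun p => p.2 == 1 && !(PySem.Str.startswith p.1 "_"))).map (fun p => p.1))
  (created_variables, deleted_variables)

-- ===== PRECONDITION & SPEC =====
def Spec_find_created_deleted_vars (pre_execution : List String) (post_execution : List String) (out : List String × List String) : Prop := out = find_created_deleted_vars_alt pre_execution post_execution
instance (pre_execution : List String) (post_execution : List String) (out : List String × List String) : Decidable (Spec_find_created_deleted_vars pre_execution post_execution out) := by unfold Spec_find_created_deleted_vars; infer_instance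

-- ===== CLAIM (what is proved, stated in full; the proofs are below) =====
def Claim_equal_find_created_deleted_vars : Prop := ∀ (pre_execution : List String) (post_execution : List String), Dom_find_created_deleted_vars pre_execution post_execution → Spec_find_created_deleted_vars pre_execution post_execution (find_created_deleted_vars pre_execution post_execution)

-- ===== LEMMAS AND PROOFS =====

-- value stored for v by the first loop of B: 1 on pre's names, else untouched
lemma getD_foldl_insert_one (l : List String) (d : PySem.Dict String Int) (v : String) :
    (l.foldl (fun d varname => d.insert varname (1 : Int)) d).getD v 0
      = if v ∈ l then 1 else d.getD v 0 := by
  induction l generalizing d with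
  | nil => simp
  | cons x xs ih =>
    simp only [List.foldl_cons, ih, List.mem_cons, PySem.Dict.getD_insert]
    by_cases hv : v ∈ xs <;> by_cases hx : v = x <;> simp [hv, hx]

-- value stored for v by the second loop of B, over a dict whose values lie in {0,1,2,3}
lemma getD_foldl_insert_bor (l : List String) (d : PySem.Dict String Int)
    (h : ∀ v, d.getD v 0 = 0 ∨ d.getD v 0 = 1 ∨ d.getD v 0 = 2 ∨ d.getD v 0 = 3) (v : String) :
    (l.foldl (fun d varname => d.insert varname (PySem.Int.bor (d.getD varname 0) 2)) d).getD v 0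
      = if v ∈ l then PySem.Int.bor (d.getD v 0) 2 else d.getD v 0 := by
  induction l generalizing d with
  | nil => simp
  | cons x xs ih =>
    have h' : ∀ w, (d.insert x (PySem.Int.bor (d.getD x 0) 2)).getD w 0 = 0 ∨
        (d.insert x (PySem.Int.bor (d.getD x 0) 2)).getD w 0 = 1 ∨
        (d.insert x (PySem.Int.bor (d.getD x 0) 2)).getD w 0 = 2 ∨
        (d.insert x (PySem.Int.bor (d.getD x 0) 2)).getD w 0 = 3 := by
      intro w
      rw [PySem.Dict.getD_insert]
      split_ifs with hw
      · rcases h x with hx | hx | hx | hx <;> rw [hx] <;> decide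
      · exact h w
    simp only [List.foldl_cons, ih _ h', List.mem_cons, PySem.Dict.getD_insert]
    by_cases hv : v ∈ xs <;> by_cases hx : v = x
    · subst hx
      simp only [hv, if_true, or_true]
      rcases h v with h0 | h0 | h0 | h0 <;> rw [h0] <;> decide
    · simp [hv, hx]
    · subst hx; simp [hv]
    · simp [hv, hx]

-- the status dict of B: keys = set(pre + post) in first-occurrence order, value = bitmask
lemma status_getD (pre post : List String) (v : String) :
    ((post.foldl (fun d varname => d.insert varname (PySem.Int.bor (d.getD varname 0) 2))
        (pre.foldl (fun d varname => d.insert varname (1 : Int)) PySem.Dict.empty)).getD v 0)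
      = if v ∈ post then (if v ∈ pre then 3 else 2) else (if v ∈ pre then 1 else 0) := by
  rw [getD_foldl_insert_bor]
  · rw [getD_foldl_insert_one]
    by_cases hpo : v ∈ post <;> by_cases hpr : v ∈ pre <;> simp [hpo, hpr] <;> decide
  · intro w
    rw [getD_foldl_insert_one]
    split_ifs <;> simp

lemma status_keys (pre post : List String) :
    ((post.foldl (fun d varname => d.insert varname (PySem.Int.bor (d.getD varname 0) 2))
        (pre.foldl (fun d varname => d.insert varname (1 : Int)) PySem.Dict.empty)).keys)
      = PySem.Set.ofList (pre ++ post) := by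
  rw [show (fun (d : PySem.Dict String Int) varname => d.insert varname (PySem.Int.bor (d.getD varname 0) 2))
        = (fun d varname => d.insert varname ((fun (d : PySem.Dict String Int) x => PySem.Int.bor (d.getD x 0) 2) d varname)) from rfl,
      PySem.Dict.keys_foldl_insert,
      show (fun (d : PySem.Dict String Int) varname => d.insert varname (1 : Int))
        = (fun d varname => d.insert varname ((fun (_ : PySem.Dict String Int) (_ : String) => (1 : Int)) d varname)) from rfl,
      PySem.Dict.keys_foldl_insert]
  simp [PySem.Set.ofList_eq_foldl, PySem.Set.update, List.foldl_append, PySem.Dict.keys_empty]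

-- filtering a growing set = growing the filtered set
lemma filter_foldl_add (p : String → Bool) (l : List String) (s : PySem.Set String) :
    (l.foldl PySem.Set.add s).filter p = (l.filter p).foldl PySem.Set.add (s.filter p) := by
  induction l generalizing s with
  | nil => simp
  | cons x xs ih =>
    have hstep : (PySem.Set.add s x).filter p
        = if p x then PySem.Set.add (s.filter p) x else s.filter p := by
      by_cases hx : x ∈ s
      · rw [PySem.Set.add_of_mem hx]
        by_cases hp : p x = true
        · rw [if_pos hp, PySem.Set.add_of_mem (List.mem_filter.mpr ⟨hx, hp⟩)]
        · rw [if_neg hp]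
      · rw [PySem.Set.add_of_not_mem hx, List.filter_append]
        by_cases hp : p x = true
        · rw [if_pos hp, PySem.Set.add_of_not_mem (fun h => hx (List.mem_filter.mp h).1)]
          simp [hp]
        · simp [hp]
    rw [List.foldl_cons, List.filter_cons, ih, hstep]
    by_cases hp : p x = true <;> simp [hp]

-- filtering distributes over Python set construction (first-occurrence dedup)
lemma filter_ofList (p : String → Bool) (l : List String) :
    (PySem.Set.ofList l).filter p = PySem.Set.ofList (l.filter p) := by
  rw [PySem.Set.ofList_eq_foldl, PySem.Set.ofList_eq_foldl, filter_foldl_add]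
  rfl

-- A's conditional-add loop is set(filtered list)
lemma foldl_skip_add (l : List String) :
    l.foldl (fun s varname => if PySem.Str.startswith varname "_" then s else PySem.Set.add s varname)
      PySem.Set.empty
      = PySem.Set.ofList (l.filter (fun varname => !PySem.Str.startswith varname "_")) := by
  rw [show (fun (s : PySem.Set String) varname =>
        if PySem.Str.startswith varname "_" then s else PySem.Set.add s varname)
      = (fun s varname => if (!PySem.Str.startswith varname "_") = true
          then PySem.Set.add s varname else s) from by
        funext s v; cases h : PySem.Str.startswith v "_" <;> simp]
  rw [PySem.List.foldl_if_eq_foldl_filter]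
  exact (PySem.Set.ofList_eq_foldl _).symm

-- nodup of the status dict's keys
lemma status_keys_nodup (pre post : List String) :
    ((post.foldl (fun d varname => d.insert varname (PySem.Int.bor (d.getD varname 0) 2))
        (pre.foldl (fun d varname => d.insert varname (1 : Int)) PySem.Dict.empty)).keys).Nodup := by
  exact PySem.Dict.nodup_keys_foldl_insert _ _ _
    (PySem.Dict.nodup_keys_foldl_insert _ _ _ (by simp [PySem.Dict.keys_empty]))

-- ===== VERDICT (by name: the statement is the Claim_ definition above) =====
theorem find_created_deleted_vars_spec : Claim_equal_find_created_deleted_vars := by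
  intro pre post _
  unfold Spec_find_created_deleted_vars find_created_deleted_vars find_created_deleted_vars_alt
  dsimp only
  rw [PySem.Dict.items_eq_map_keys _ (status_keys_nodup pre post) 0,
      List.filter_map, List.filter_map, List.map_map, List.map_map]
  rw [show ((fun (p : String × Int) => p.1) ∘ fun k => (k,
        ((post.foldl (fun d varname => d.insert varname (PySem.Int.bor (d.getD varname 0) 2))
          (pre.foldl (fun d varname => d.insert varname (1 : Int)) PySem.Dict.empty)).getD k 0)))
      = id from rfl, List.map_id, List.map_id]
  rw [status_keys, filter_ofList, filter_ofList, PySem.Set.ofList_ofList, PySem.Set.ofList_ofList,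
      List.filter_append, List.filter_append]
  rw [foldl_skip_add, foldl_skip_add]
  have hc : ∀ a ∈ pre, ¬ (((fun (p : String × Int) => p.2 == 2 && !(PySem.Str.startswith p.1 "_")) ∘
      fun k => (k, ((post.foldl (fun d varname => d.insert varname (PySem.Int.bor (d.getD varname 0) 2))
        (pre.foldl (fun d varname => d.insert varname (1 : Int)) PySem.Dict.empty)).getD k 0))) a = true) := by
    intro a ha
    simp only [Function.comp_apply, status_getD]
    by_cases hpo : a ∈ post <;> simp [hpo, ha]
  have hd : ∀ a ∈ post, ¬ (((fun (p : String × Int) => p.2 == 1 && !(PySem.Str.startswith p.1 "_")) ∘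
      fun k => (k, ((post.foldl (fun d varname => d.insert varname (PySem.Int.bor (d.getD varname 0) 2))
        (pre.foldl (fun d varname => d.insert varname (1 : Int)) PySem.Dict.empty)).getD k 0))) a = true) := by
    intro a ha
    simp only [Function.comp_apply, status_getD]
    by_cases hpr : a ∈ pre <;> simp [hpr, ha]
  rw [List.filter_eq_nil_iff.mpr hc, List.filter_eq_nil_iff.mpr hd]
  rw [List.nil_append, List.append_nil]
  rw [Prod.mk.injEq]
  constructor
  · apply congrArg
    rw [show PySem.Set.diff post pre = post.filter (fun x => !PySem.Set.contains pre x) from rfl,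
        List.filter_filter]
    apply List.filter_congr
    intro a ha
    simp only [Function.comp_apply, status_getD, ha, if_true]
    by_cases hpr : a ∈ pre <;> simp [hpr, PySem.Set.contains]
  · apply congrArg
    rw [show PySem.Set.diff pre post = pre.filter (fun x => !PySem.Set.contains post x) from rfl,
        List.filter_filter]
    apply List.filter_congr
    intro a ha
    simp only [Function.comp_apply, status_getD, ha, if_true]
    by_cases hpo : a ∈ post <;> simp [hpo, PySem.Set.contains]
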